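-- pv_equiv track=rewrite | github.com/nicoletanyt/AOC | DAY 13/part2.py | check_h
-- ===== SOURCE A (Python) =====
-- def check_h(c, lines, avail) -> bool:
--     offset = 0
--     while True:
--         if c + offset + 1 == len(lines) or lines[c + offset + 1] == "" or c - offset - 2 < 0 or lines[c - offset - 2] == "":
--             return True
--         elif lines[c + offset + 1] != lines[c - offset - 2]:
--             # check if they are one off
--             if not avail:
--                 return False
--             elif avail and not checkDiff(lines[c + offset + 1], lines[c - offset - 2]):
--                 return False
--         offset += 1
--
-- def checkDiff(s1, s2) -> bool:
--     counter = 0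
--     if s1 == "" or s2 == "":
--         return False
--     for i in range(0, len(s1)):
--         if s1[i] != s2[i]:
--             counter += 1
--         if counter > 1:
--             return False
--     return True
-- ===== SOURCE B (Python) =====
-- def check_h(c, lines, avail) -> bool:
--     # Collect the mirrored strips once: rows below the fold, walking down from c+1
--     # until the far edge or a blank row (an out-of-range fold raises IndexError),
--     # and rows above it, walking up from c-2; then compare the strips pairwise.
--     below = []
--     i = c + 1
--     while i != len(lines) and lines[i] != "":
--         below.append(lines[i])
--         i += 1
--     above = []
--     j = c - 2
--     while 0 <= j < len(lines) and lines[j] != "":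
--         above.append(lines[j])
--         j -= 1
--     return all(b == t or (avail and _close(b, t)) for b, t in zip(below, above))
--
-- def _close(s1, s2) -> bool:
--     return bool(s1) and bool(s2) and sum(a != b for a, b in zip(s1, s2)) <= 1
-- ===== Notes on version B (the rewrite author's own statement) =====
-- stated objective: alternative
-- what changed: B first materialises the two mirrored strips (rows below the fold and rows above it, each cut at the edge or first blank line) and then checks them pairwise with zip/all using a mismatch-count tolerance test, instead of A's single while-True loop that re-indexes the list with a growing offset and an early-exit character counter.
-- outside the precondition, e.g. on check_h(3, ['ab', 'xx', 'cc', 'dd', 'ab', 'abc', 'e'], True): A returns False, B returns False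
import Mathlib
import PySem

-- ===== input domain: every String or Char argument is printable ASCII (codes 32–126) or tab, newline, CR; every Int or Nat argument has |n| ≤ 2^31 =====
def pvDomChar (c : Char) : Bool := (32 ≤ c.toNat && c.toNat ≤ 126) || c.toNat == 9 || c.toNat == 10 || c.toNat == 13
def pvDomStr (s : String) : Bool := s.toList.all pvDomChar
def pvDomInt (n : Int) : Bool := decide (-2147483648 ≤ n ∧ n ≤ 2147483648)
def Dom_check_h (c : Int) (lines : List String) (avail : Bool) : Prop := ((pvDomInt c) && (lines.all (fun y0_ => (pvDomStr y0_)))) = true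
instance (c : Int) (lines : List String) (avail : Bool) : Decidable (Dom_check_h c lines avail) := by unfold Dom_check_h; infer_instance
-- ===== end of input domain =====

-- B builds the two mirrored strips as lists and checks them pairwise with zip/all,
-- replacing A's single offset-indexed while-loop; objective: alternative decomposition (same cost).


-- ===== PORT A =====
-- String comparisons are decided on .toList (exact: String equality ↔ toList equality).
-- checkDiff's inner loop: Python raises IndexError when i ≥ len(s2); there l2.getD returns a
-- junk default — such inputs are excluded by Pre_check_h.
def pvCheckDiffGo (l1 l2 : List Char) (i counter : Nat) : Bool :=
  if h : i < l1.length then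
    let counter' := if l1[i] ≠ l2.getD i ' ' then counter + 1 else counter
    if counter' > 1 then false else pvCheckDiffGo l1 l2 (i + 1) counter'
  else true
termination_by l1.length - i

def pvCheckDiff (s1 s2 : String) : Bool :=
  if s1.toList = [] ∨ s2.toList = [] then false
  else pvCheckDiffGo s1.toList s2.toList 0 0

-- the while True loop; pyGet? = none is where Python raises IndexError (excluded by Pre_check_h)
def pvCheckHGo (lines : List String) (avail : Bool) (c : Int) (offset : Nat) : Bool :=
  if c + offset + 1 = (lines.length : Int) then true
  else
    match PySem.List.pyGet? lines (c + offset + 1) with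
    | none => true      -- Python raises IndexError here; outside Pre_check_h
    | some up =>
      if up.toList = [] then true
      else if c - offset - 2 < 0 then true
      else
        match _h : PySem.List.pyGet? lines (c - offset - 2) with
        | none => true  -- unreachable under Pre_check_h (0 ≤ c-offset-2 < len)
        | some lo =>
          if lo.toList = [] then true
          else if up.toList ≠ lo.toList then
            if !avail then false
            else if avail && !pvCheckDiff up lo then false
            else pvCheckHGo lines avail c (offset + 1)
          else pvCheckHGo lines avail c (offset + 1)
termination_by (c - offset).toNat
decreasing_by all_goals omega

def check_h (c : Int) (lines : List String) (avail : Bool) : Bool :=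
  pvCheckHGo lines avail c 0

-- ===== PORT B =====
-- strip of rows below the fold, from index i upward, cut at the far edge or first blank;
-- pyGet? = none is where Python B raises IndexError (outside Pre_check_h)
def altBelow (lines : List String) (i : Int) : List String :=
  if i = (lines.length : Int) then []
  else
    match h2 : PySem.List.pyGet? lines i with
    | none => []      -- Python B raises IndexError here; outside Pre_check_h
    | some s => if s.toList = [] then [] else s :: altBelow lines (i + 1)
termination_by ((lines.length : Int) - i).toNat
decreasing_by
  have hr : PySem.Raise.InRange lines.length i := by
    by_contra hc
    rw [← PySem.List.pyGet?_eq_none_iff] at hc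
    simp [hc] at h2
  rw [PySem.Raise.InRange] at hr
  omega

-- strip of rows above the fold, from index j downward, cut at edge or first blank
def altAbove (lines : List String) (j : Int) : List String :=
  if h : 0 ≤ j ∧ j < (lines.length : Int) then
    let s := lines.getD j.toNat ""
    if s.toList = [] then [] else s :: altAbove lines (j - 1)
  else []
termination_by (j + 1).toNat
decreasing_by omega

def altClose (s1 s2 : String) : Bool :=
  !(s1.toList = []) && !(s2.toList = []) &&
    ((s1.toList.zip s2.toList).countP (fun p => p.1 ≠ p.2) ≤ 1)

def altPred (avail : Bool) (p : String × String) : Bool :=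
  (p.1.toList = p.2.toList : Bool) || (avail && altClose p.1 p.2)

def check_h_alt (c : Int) (lines : List String) (avail : Bool) : Bool :=
  ((altBelow lines (c + 1)).zip (altAbove lines (c - 2))).all (altPred avail)

-- ===== PRECONDITION & SPEC =====
-- Pre_ excludes the inputs on which A raises IndexError: c+1 outside [-len, len], or — only
-- when avail is true, so checkDiff can be reached — a mirror pair of non-blank rows (positions
-- c+off+1 and c-off-2) whose upper row is longer than its lower row with fewer than 2
-- mismatches in the overlap (checkDiff then runs off the end of s2); it conservatively also
-- excludes some such inputs on which A happens to return before comparing that pair.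
def Pre_check_h (c : Int) (lines : List String) (avail : Bool) : Prop :=
  -(lines.length : Int) ≤ c + 1 ∧ c + 1 ≤ (lines.length : Int) ∧
  (avail = false ∨
    ∀ off ∈ List.range lines.length, 0 ≤ c - (off:Int) - 2 → c + off + 1 < (lines.length : Int) →
      (lines.getD (c + off + 1).toNat "").toList ≠ [] →
      (lines.getD (c - off - 2).toNat "").toList ≠ [] →
      ((lines.getD (c + off + 1).toNat "").toList.length ≤
          (lines.getD (c - off - 2).toNat "").toList.length ∨
        2 ≤ ((lines.getD (c + off + 1).toNat "").toList.zip
              (lines.getD (c - off - 2).toNat "").toList).countP (fun p => p.1 ≠ p.2)))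
instance (c : Int) (lines : List String) (avail : Bool) : Decidable (Pre_check_h c lines avail) := by
  unfold Pre_check_h; infer_instance

def pvWitness_check_h : Int × List String × Bool := (1, ["ab", "ab"], true)

def Spec_check_h (c : Int) (lines : List String) (avail : Bool) (out : Bool) : Prop := out = check_h_alt c lines avail
instance (c : Int) (lines : List String) (avail : Bool) (out : Bool) : Decidable (Spec_check_h c lines avail out) := by unfold Spec_check_h; infer_instance

-- ===== CLAIM (what is proved, stated in full; the proofs are below) =====
def Claim_equal_check_h : Prop := ∀ (c : Int) (lines : List String) (avail : Bool), Dom_check_h c lines avail → Pre_check_h c lines avail → Spec_check_h c lines avail (check_h c lines avail)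


-- ===== LEMMAS AND PROOFS =====

theorem pvCheckDiffGo_eq (l1 l2 : List Char) (hlen : l1.length ≤ l2.length) (i counter : Nat)
    (hc : counter ≤ 1) :
    pvCheckDiffGo l1 l2 i counter =
      decide (counter + ((l1.drop i).zip (l2.drop i)).countP (fun p => p.1 ≠ p.2) ≤ 1) := by
  fun_induction pvCheckDiffGo l1 l2 i counter with
  | case1 i counter h cv hgt =>
    have hi2 : i < l2.length := lt_of_lt_of_le h hlen
    have hg : l2.getD i ' ' = l2[i] := List.getD_eq_getElem l2 ' ' hi2
    simp only [cv, hg] at hgt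
    rw [List.drop_eq_getElem_cons h, List.drop_eq_getElem_cons hi2]
    simp only [List.zip_cons_cons, List.countP_cons]
    by_cases hne : l1[i] = l2[i]
    · rw [dif_neg (by simp [hne])] at hgt; omega
    · rw [dif_pos hne] at hgt
      simp [hne]
      omega
  | case2 i counter h cv hle ih =>
    have hi2 : i < l2.length := lt_of_lt_of_le h hlen
    have hg : l2.getD i ' ' = l2[i] := List.getD_eq_getElem l2 ' ' hi2
    simp only [cv, hg] at hle ih ⊢
    rw [List.drop_eq_getElem_cons h, List.drop_eq_getElem_cons hi2]
    simp only [List.zip_cons_cons, List.countP_cons]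
    by_cases hne : l1[i] = l2[i]
    · simp only [dif_neg (by simp [hne] : ¬ l1[i] ≠ l2[i])] at hle ih ⊢
      rw [ih hc]
      simp [hne]
    · simp only [dif_pos hne] at hle ih ⊢
      rw [ih (by omega)]
      simp only [decide_eq_decide]
      simp [hne]
      omega
  | case3 i counter h =>
    simp [List.drop_eq_nil_of_le (by omega : l1.length ≤ i)]
    omega

theorem pvCheckDiffGo_false (l1 l2 : List Char) (i counter : Nat) (hc : counter ≤ 1)
    (h2m : 2 ≤ counter + ((l1.drop i).zip (l2.drop i)).countP (fun p => p.1 ≠ p.2)) :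
    pvCheckDiffGo l1 l2 i counter = false := by
  revert hc h2m
  fun_induction pvCheckDiffGo l1 l2 i counter with
  | case1 i counter h cv hgt =>
    intro hc h2m
    rfl
  | case2 i counter h cv hle ih =>
    intro hc h2m
    by_cases hi2 : i < l2.length
    · have hg : l2.getD i ' ' = l2[i] := List.getD_eq_getElem l2 ' ' hi2
      simp only [cv, hg] at hle ih ⊢
      rw [List.drop_eq_getElem_cons h, List.drop_eq_getElem_cons hi2] at h2m
      simp only [List.zip_cons_cons, List.countP_cons] at h2m
      by_cases hne : l1[i] = l2[i]
      · simp only [dif_neg (by simp [hne] : ¬ l1[i] ≠ l2[i])] at hle ih ⊢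
        exact ih hc (by simpa [hne] using h2m)
      · simp only [dif_pos hne] at hle ih ⊢
        exact ih (by omega) (by simp only [ne_eq]; simp [hne] at h2m ⊢; omega)
    · exfalso
      rw [List.drop_eq_nil_of_le (by omega : l2.length ≤ i)] at h2m
      simp [List.zip_nil_right] at h2m
      omega
  | case3 i counter h =>
    intro hc h2m
    exfalso
    rw [List.drop_eq_nil_of_le (by omega : l1.length ≤ i)] at h2m
    simp at h2m
    omega

theorem pvCheckDiff_eq_altClose (s1 s2 : String)
    (hlen : s1.toList.length ≤ s2.toList.length ∨
      2 ≤ (s1.toList.zip s2.toList).countP (fun p => p.1 ≠ p.2)) :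
    pvCheckDiff s1 s2 = altClose s1 s2 := by
  unfold pvCheckDiff altClose
  by_cases h1 : s1.toList = []
  · simp [h1]
  · by_cases h2 : s2.toList = []
    · simp [h1, h2]
    · rw [if_neg (by tauto)]
      rcases hlen with hle | h2m
      · rw [pvCheckDiffGo_eq _ _ hle 0 0 (by omega)]
        simp [h1, h2]
      · rw [pvCheckDiffGo_false _ _ 0 0 (by omega) (by simpa using h2m)]
        simp only [ne_eq, decide_not] at h2m
        simp only [h1, h2]
        simp
        omega

theorem altBelow_len (lines : List String) (i : Int) (h : i = (lines.length : Int)) :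
    altBelow lines i = [] := by
  rw [altBelow]; simp [h]

theorem altBelow_none (lines : List String) (i : Int) (h : ¬ i = (lines.length : Int))
    (h2 : PySem.List.pyGet? lines i = none) : altBelow lines i = [] := by
  rw [altBelow, if_neg h, h2]

theorem altBelow_some (lines : List String) (i : Int) (s : String)
    (h : ¬ i = (lines.length : Int)) (h2 : PySem.List.pyGet? lines i = some s) :
    altBelow lines i = if s.toList = [] then [] else s :: altBelow lines (i + 1) := by
  rw [altBelow, if_neg h, h2]

theorem altAbove_stop (lines : List String) (j : Int)
    (h : ¬(0 ≤ j ∧ j < (lines.length : Int))) : altAbove lines j = [] := by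
  rw [altAbove]; simp [h]

theorem altAbove_step (lines : List String) (j : Int)
    (h : 0 ≤ j ∧ j < (lines.length : Int)) :
    altAbove lines j =
      if (lines.getD j.toNat "").toList = [] then []
      else lines.getD j.toNat "" :: altAbove lines (j - 1) := by
  rw [altAbove]; simp [h]

theorem pvCheckHGo_eq (lines : List String) (avail : Bool) (c : Int)
    (hlen : avail = false ∨
      ∀ off ∈ List.range lines.length, 0 ≤ c - (off:Int) - 2 → c + off + 1 < (lines.length : Int) →
        (lines.getD (c + off + 1).toNat "").toList ≠ [] →
        (lines.getD (c - off - 2).toNat "").toList ≠ [] →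
        ((lines.getD (c + off + 1).toNat "").toList.length ≤
            (lines.getD (c - off - 2).toNat "").toList.length ∨
          2 ≤ ((lines.getD (c + off + 1).toNat "").toList.zip
                (lines.getD (c - off - 2).toNat "").toList).countP (fun p => p.1 ≠ p.2)))
    (offset : Nat) (hub : c + offset + 1 ≤ (lines.length : Int)) :
    pvCheckHGo lines avail c offset =
      ((altBelow lines (c + offset + 1)).zip (altAbove lines (c - offset - 2))).all (altPred avail) := by
  revert hub
  fun_induction pvCheckHGo lines avail c offset with
  | case1 off h =>
    intro hub
    rw [altBelow_len _ _ h]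
    simp
  | case2 off h hget =>
    intro hub
    rw [altBelow_none _ _ h hget]
    simp
  | case3 off h up hget hemp =>
    intro hub
    rw [altBelow_some _ _ _ h hget, if_pos hemp]
    simp
  | case4 off h up hget hemp hneg =>
    intro hub
    rw [altAbove_stop _ _ (by omega), List.zip_nil_right]
    simp
  | case5 off h up hget hemp hneg hget2 =>
    intro hub
    exfalso
    have hnr := (PySem.List.pyGet?_eq_none_iff lines _).mp hget2
    rw [PySem.Raise.InRange] at hnr
    omega
  | case6 off h up hget hemp hneg lo hget2 hemp2 =>
    intro hub
    have hlo' : lines[(c - off - 2).toNat]? = some lo := by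
      rw [← PySem.List.pyGet?_of_nonneg lines (by omega : (0:Int) ≤ c - off - 2)]; exact hget2
    obtain ⟨hjlen, -⟩ := List.getElem?_eq_some_iff.mp hlo'
    rw [altAbove_step _ _ ⟨by omega, by omega⟩]
    rw [List.getD_eq_getElem?_getD, hlo']
    simp [hemp2, List.zip_nil_right]
  | case7 off h up hget hemp hneg lo hget2 hemp2 hne hav =>
    intro hub
    have hup' : lines[(c + off + 1).toNat]? = some up := by
      rw [← PySem.List.pyGet?_of_nonneg lines (by omega : (0:Int) ≤ c + off + 1)]; exact hget
    have hlo' : lines[(c - off - 2).toNat]? = some lo := by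
      rw [← PySem.List.pyGet?_of_nonneg lines (by omega : (0:Int) ≤ c - off - 2)]; exact hget2
    obtain ⟨hilen, -⟩ := List.getElem?_eq_some_iff.mp hup'
    obtain ⟨hjlen, -⟩ := List.getElem?_eq_some_iff.mp hlo'
    rw [altBelow_some _ _ _ h hget, if_neg hemp]
    rw [altAbove_step _ _ ⟨by omega, by omega⟩, List.getD_eq_getElem?_getD, hlo', if_neg (by simpa using hemp2)]
    rw [List.zip_cons_cons, List.all_cons]
    simp only [Option.getD_some]
    have havf : avail = false := by simpa using hav
    have : altPred avail (up, lo) = false := by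
      unfold altPred; simp [hne, havf]
    rw [this]
    simp
  | case8 off h up hget hemp hneg lo hget2 hemp2 hne hav hdiff =>
    intro hub
    have hup' : lines[(c + off + 1).toNat]? = some up := by
      rw [← PySem.List.pyGet?_of_nonneg lines (by omega : (0:Int) ≤ c + off + 1)]; exact hget
    have hlo' : lines[(c - off - 2).toNat]? = some lo := by
      rw [← PySem.List.pyGet?_of_nonneg lines (by omega : (0:Int) ≤ c - off - 2)]; exact hget2
    obtain ⟨hilen, -⟩ := List.getElem?_eq_some_iff.mp hup'
    obtain ⟨hjlen, -⟩ := List.getElem?_eq_some_iff.mp hlo'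
    rw [altBelow_some _ _ _ h hget, if_neg hemp]
    rw [altAbove_step _ _ ⟨by omega, by omega⟩, List.getD_eq_getElem?_getD, hlo', if_neg (by simpa using hemp2)]
    rw [List.zip_cons_cons, List.all_cons]
    simp only [Option.getD_some]
    have havt : avail = true := by simpa using hav
    have hdf : pvCheckDiff up lo = false := by
      rcases Bool.and_eq_true_iff.mp hdiff with ⟨-, hd⟩
      simpa using hd
    have hgd1 : lines.getD (c + (off : Int) + 1).toNat "" = up := by
      rw [List.getD_eq_getElem?_getD, hup']; rfl
    have hgd2 : lines.getD (c - (off : Int) - 2).toNat "" = lo := by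
      rw [List.getD_eq_getElem?_getD, hlo']; rfl
    have hcond := hlen.resolve_left (by simp [havt]) off (List.mem_range.mpr (by omega)) (by omega) (by omega)
      (by rw [hgd1]; exact hemp) (by rw [hgd2]; exact hemp2)
    rw [hgd1, hgd2] at hcond
    have hcl : altClose up lo = false := by
      rw [← pvCheckDiff_eq_altClose up lo hcond]
      exact hdf
    have : altPred avail (up, lo) = false := by
      unfold altPred; simp [hne, hcl]
    rw [this]
    simp
  | case9 off h up hget hemp hneg lo hget2 hemp2 hne hav hdiff ih =>
    intro hub
    have hup' : lines[(c + off + 1).toNat]? = some up := by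
      rw [← PySem.List.pyGet?_of_nonneg lines (by omega : (0:Int) ≤ c + off + 1)]; exact hget
    have hlo' : lines[(c - off - 2).toNat]? = some lo := by
      rw [← PySem.List.pyGet?_of_nonneg lines (by omega : (0:Int) ≤ c - off - 2)]; exact hget2
    obtain ⟨hilen, -⟩ := List.getElem?_eq_some_iff.mp hup'
    obtain ⟨hjlen, -⟩ := List.getElem?_eq_some_iff.mp hlo'
    rw [altBelow_some _ _ _ h hget, if_neg hemp]
    rw [altAbove_step _ _ ⟨by omega, by omega⟩, List.getD_eq_getElem?_getD, hlo', if_neg (by simpa using hemp2)]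
    rw [List.zip_cons_cons, List.all_cons]
    simp only [Option.getD_some]
    have havt : avail = true := by simpa using hav
    have hdt : pvCheckDiff up lo = true := by
      rcases Bool.not_eq_true _ ▸ hdiff with h'
      simp [havt] at h'
      exact h'
    have hgd1 : lines.getD (c + (off : Int) + 1).toNat "" = up := by
      rw [List.getD_eq_getElem?_getD, hup']; rfl
    have hgd2 : lines.getD (c - (off : Int) - 2).toNat "" = lo := by
      rw [List.getD_eq_getElem?_getD, hlo']; rfl
    have hcond := hlen.resolve_left (by simp [havt]) off (List.mem_range.mpr (by omega)) (by omega) (by omega)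
      (by rw [hgd1]; exact hemp) (by rw [hgd2]; exact hemp2)
    rw [hgd1, hgd2] at hcond
    have hcl : altClose up lo = true := by
      rw [← pvCheckDiff_eq_altClose up lo hcond]
      exact hdt
    have hpr : altPred avail (up, lo) = true := by
      unfold altPred; simp [havt, hcl]
    rw [hpr, Bool.true_and, ih (by push_cast; omega)]
    congr 2 <;> push_cast <;> ring_nf
  | case10 off h up hget hemp hneg lo hget2 hemp2 heq ih =>
    intro hub
    have hup' : lines[(c + off + 1).toNat]? = some up := by
      rw [← PySem.List.pyGet?_of_nonneg lines (by omega : (0:Int) ≤ c + off + 1)]; exact hget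
    have hlo' : lines[(c - off - 2).toNat]? = some lo := by
      rw [← PySem.List.pyGet?_of_nonneg lines (by omega : (0:Int) ≤ c - off - 2)]; exact hget2
    obtain ⟨hilen, -⟩ := List.getElem?_eq_some_iff.mp hup'
    obtain ⟨hjlen, -⟩ := List.getElem?_eq_some_iff.mp hlo'
    rw [altBelow_some _ _ _ h hget, if_neg hemp]
    rw [altAbove_step _ _ ⟨by omega, by omega⟩, List.getD_eq_getElem?_getD, hlo', if_neg (by simpa using hemp2)]
    rw [List.zip_cons_cons, List.all_cons]
    simp only [Option.getD_some]
    have hpr : altPred avail (up, lo) = true := by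
      unfold altPred
      simp [not_not.mp heq]
    rw [hpr, Bool.true_and, ih (by push_cast; omega)]
    congr 2 <;> push_cast <;> ring_nf

-- ===== VERDICT (by name: the statement is the Claim_ definition above) =====
theorem check_h_spec : Claim_equal_check_h := by
  intro c lines avail _hdom hpre
  unfold Spec_check_h check_h check_h_alt
  have := pvCheckHGo_eq lines avail c hpre.2.2 0 (by simpa using hpre.2.1)
  simpa using this
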